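-- pv_equiv track=rewrite | github.com/ktgiahieu/paper-review-assistant | experiments/scripts/paper_manipulation/plant_author_affiliation/plant_author_affiliation.py | add_author_section_to_paper
-- ===== SOURCE A (Python) =====
-- def add_author_section_to_paper(paper_content: str, author_name: str, affiliation: str) -> str:
--     """
--     Add author and affiliation section to the paper markdown.
--
--     Inserts after the title and before the Abstract section.
--     If authors already exist, appends the new author.
--     """
--     lines = paper_content.split('\n')
--     new_lines = []
--
--     # Find the title (first # heading) and Abstract section
--     title_idx = None
--     abstract_idx = None
--     author_section_start = None
--     author_section_end = None
--
--     for i, line in enumerate(lines):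
--         # Find the first # heading (title)
--         if title_idx is None and line.strip().startswith('# ') and not line.strip().startswith('## '):
--             title_idx = i
--         # Find the Abstract section
--         if line.strip().startswith('## Abstract'):
--             abstract_idx = i
--             break
--         # Check if there's already an author section (look for patterns like "Author Name" or affiliations with *)
--         if title_idx is not None and abstract_idx is None:
--             # Look for author-like patterns: bold text, italic text (affiliations), or email patterns
--             if (line.strip().startswith('**') and line.strip().endswith('**')) or \
--                (line.strip().startswith('*') and '@' not in line and 'http' not in line):
--                 if author_section_start is None:
--                     author_section_start = i
--                 author_section_end = i + 1
--
--     # If we found both title and abstract, insert author section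
--     if title_idx is not None and abstract_idx is not None:
--         # Add title
--         new_lines.extend(lines[:title_idx + 1])
--
--         # Check if there's already an author section
--         if author_section_start is not None and author_section_end is not None:
--             # Append new author to existing author section
--             # First, add everything up to the author section
--             new_lines.extend(lines[title_idx + 1:author_section_end])
--             # Add the new author as a new entry (typical format: author on one line, affiliation on next)
--             new_lines.append(f"**{author_name}**")
--             new_lines.append(f"*{affiliation}*")
--             # Add any blank lines that might exist before abstract
--             # Find where the author section ends and abstract begins
--             remaining_lines = lines[author_section_end:abstract_idx]
--             # Add remaining lines (should be blank lines or similar)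
--             new_lines.extend(remaining_lines)
--             # Ensure we have the abstract section
--             new_lines.extend(lines[abstract_idx:])
--         else:
--             # No existing author section, add new one
--             new_lines.append('')
--             new_lines.append(f"**{author_name}**")
--             new_lines.append(f"*{affiliation}*")
--             new_lines.append('')
--             # Add the rest (Abstract onwards)
--             new_lines.extend(lines[abstract_idx:])
--     else:
--         # Fallback: if structure is different, try to add after first line
--         if lines:
--             new_lines.append(lines[0])  # Title
--             new_lines.append('')
--             new_lines.append(f"**{author_name}**")
--             new_lines.append(f"*{affiliation}*")
--             new_lines.append('')
--             new_lines.extend(lines[1:])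
--         else:
--             # Empty file, just add the author section
--             new_lines.append(f"**{author_name}**")
--             new_lines.append(f"*{affiliation}*")
--             new_lines.append('')
--
--     return '\n'.join(new_lines)
-- ===== SOURCE B (Python) =====
-- def _is_abstract(line):
--     return line.strip().startswith('## Abstract')
--
--
-- def _is_title(line):
--     s = line.strip()
--     return s.startswith('# ') and not s.startswith('## ')
--
--
-- def _is_author_like(line):
--     s = line.strip()
--     return (s.startswith('**') and s.endswith('**')) or \
--            (s.startswith('*') and '@' not in line and 'http' not in line)
--
--
-- def add_author_section_to_paper(paper_content: str, author_name: str, affiliation: str) -> str: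
--     """Insert an author/affiliation block after the title and before '## Abstract'.
--
--     One backward sweep over the lines keeps just three indices — the first
--     '## Abstract' line (ab), the first title before it (t) and the last
--     author-like line before it (ja) — then a single splice builds the result.
--     """
--     lines = paper_content.split('\n')
--     block = [f"**{author_name}**", f"*{affiliation}*"]
--     ab = t = ja = None
--     for i in range(len(lines) - 1, -1, -1):
--         line = lines[i]
--         if _is_abstract(line):
--             ab, t, ja = i, None, None
--         elif ab is not None:
--             if _is_title(line):
--                 t = i
--             elif ja is None and _is_author_like(line):
--                 ja = i
--     if ab is None or t is None:
--         # degenerate structure: block goes right after the first line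
--         if lines:
--             return '\n'.join([lines[0], ''] + block + [''] + lines[1:])
--         return '\n'.join(block + [''])
--     if ja is not None and ja > t:
--         return '\n'.join(lines[:ja + 1] + block + lines[ja + 1:])
--     return '\n'.join(lines[:t + 1] + [''] + block + [''] + lines[ab:])
-- ===== Notes on version B (the rewrite author's own statement) =====
-- stated objective: simpler
-- what changed: Replaces A's forward break-driven scan with four mutable trackers and a three-way slice assembly by a single backward sweep that keeps only three indices (first abstract, first title before it, last author-like line before it) followed by one splice.
import Mathlib
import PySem

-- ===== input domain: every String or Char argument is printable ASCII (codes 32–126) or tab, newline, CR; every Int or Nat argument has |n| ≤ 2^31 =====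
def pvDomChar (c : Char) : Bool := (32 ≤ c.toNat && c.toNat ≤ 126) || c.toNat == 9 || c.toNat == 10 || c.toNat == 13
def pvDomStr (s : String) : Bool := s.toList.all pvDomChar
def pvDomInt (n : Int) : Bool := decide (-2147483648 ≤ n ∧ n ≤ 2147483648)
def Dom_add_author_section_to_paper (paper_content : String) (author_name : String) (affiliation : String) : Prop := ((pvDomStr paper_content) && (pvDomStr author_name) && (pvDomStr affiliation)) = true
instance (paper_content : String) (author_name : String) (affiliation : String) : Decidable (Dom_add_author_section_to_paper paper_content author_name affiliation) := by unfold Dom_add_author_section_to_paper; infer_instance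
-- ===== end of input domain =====

-- B replaces A's forward break-driven scan (four mutable trackers, three-way slice assembly)
-- by one backward sweep keeping three indices plus a single splice; objective: simpler.

-- A-side line predicates (the tests A applies to a line).
def pvIsTitle (l : String) : Bool :=
  PySem.Str.startswith (PySem.Str.strip l) "# " && !PySem.Str.startswith (PySem.Str.strip l) "## "

def pvIsAbstract (l : String) : Bool :=
  PySem.Str.startswith (PySem.Str.strip l) "## Abstract"

def pvIsAuthor (l : String) : Bool :=
  (PySem.Str.startswith (PySem.Str.strip l) "**" && PySem.Str.endswith (PySem.Str.strip l) "**")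
  || (PySem.Str.startswith (PySem.Str.strip l) "*" && !PySem.Str.isIn "@" l && !PySem.Str.isIn "http" l)

-- ===== PORT A =====
-- A's single for-loop with break: state (title_idx, abstract_idx, author_start, author_end).
def pvScanA : List String → Nat → Option Nat → Option Nat → Option Nat → Option Nat →
    Option Nat × Option Nat × Option Nat × Option Nat
  | [], _, t, ab, st, en => (t, ab, st, en)
  | l :: rest, i, t, ab, st, en =>
    let t' := if t.isNone && pvIsTitle l then some i else t
    if pvIsAbstract l then (t', some i, st, en)   -- 'break'
    else
      let hit := t'.isSome && ab.isNone && pvIsAuthor l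
      let st' := if hit then (if st.isNone then some i else st) else st
      let en' := if hit then some (i + 1) else en
      pvScanA rest (i + 1) t' ab st' en'

-- Slices lines[a:b] with the non-negative indices A uses are List.take/drop.
def add_author_section_to_paper (paper_content : String) (author_name : String) (affiliation : String) : String :=
  let lines := (PySem.Str.split? paper_content "\n").getD []
  let newLines :=
    match pvScanA lines 0 none none none none with
    | (some t, some ab, some _st, some en) =>
        lines.take (t + 1) ++ (lines.drop (t + 1)).take (en - (t + 1))
          ++ ["**" ++ author_name ++ "**", "*" ++ affiliation ++ "*"]
          ++ (lines.drop en).take (ab - en) ++ lines.drop ab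
    | (some t, some ab, _, _) =>
        lines.take (t + 1) ++ ["", "**" ++ author_name ++ "**", "*" ++ affiliation ++ "*", ""]
          ++ lines.drop ab
    | _ =>
        match lines with
        | [] => ["**" ++ author_name ++ "**", "*" ++ affiliation ++ "*", ""]
        | l0 :: rest => [l0, "", "**" ++ author_name ++ "**", "*" ++ affiliation ++ "*", ""] ++ rest
  PySem.Str.join "\n" newLines

-- ===== PORT B =====
-- B-side line predicates (Source B's _is_title / _is_abstract / _is_author_like)
def pvIsTitleB (l : String) : Bool :=
  PySem.Str.startswith (PySem.Str.strip l) "# " && !PySem.Str.startswith (PySem.Str.strip l) "## "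

def pvIsAbstractB (l : String) : Bool :=
  PySem.Str.startswith (PySem.Str.strip l) "## Abstract"

def pvIsAuthorB (l : String) : Bool :=
  (PySem.Str.startswith (PySem.Str.strip l) "**" && PySem.Str.endswith (PySem.Str.strip l) "**")
  || (PySem.Str.startswith (PySem.Str.strip l) "*" && !PySem.Str.isIn "@" l && !PySem.Str.isIn "http" l)

-- the body of Source B's backward 'for i in range(len(lines)-1, -1, -1)' loop, one line at a time
def pvStepB (st : Option Nat × Option Nat × Option Nat) (li : String × Nat) :
    Option Nat × Option Nat × Option Nat :=
  if pvIsAbstractB li.1 then (some li.2, none, none)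
  else match st with
    | (none, _, _) => st
    | (some ab, t, ja) =>
      if pvIsTitleB li.1 then (some ab, some li.2, ja)
      else if ja.isNone && pvIsAuthorB li.1 then (some ab, t, some li.2)
      else st

def add_author_section_to_paper_alt (paper_content : String) (author_name : String) (affiliation : String) : String :=
  let lines := (PySem.Str.split? paper_content "\n").getD []
  let block := ["**" ++ author_name ++ "**", "*" ++ affiliation ++ "*"]
  -- the descending-index loop is a right fold over the enumerated lines
  let st := (lines.zipIdx).foldr (fun li st => pvStepB st li) (none, none, none)
  -- Source B: 'if ab is None or t is None: ...' (degenerate structure)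
  let fallback :=
    if lines.isEmpty then PySem.Str.join "\n" (block ++ [""])
    else PySem.Str.join "\n" ([lines.headD "", ""] ++ block ++ [""] ++ lines.tail)
  match st.1 with
  | none => fallback
  | some ab =>
    match st.2.1 with
    | none => fallback
    | some t =>
      match st.2.2 with
      | some j =>
          if t < j then PySem.Str.join "\n" (lines.take (j + 1) ++ block ++ lines.drop (j + 1))
          else PySem.Str.join "\n" (lines.take (t + 1) ++ [""] ++ block ++ [""] ++ lines.drop ab)
      | none => PySem.Str.join "\n" (lines.take (t + 1) ++ [""] ++ block ++ [""] ++ lines.drop ab)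

-- ===== PRECONDITION & SPEC =====
def Spec_add_author_section_to_paper (paper_content : String) (author_name : String) (affiliation : String) (out : String) : Prop := out = add_author_section_to_paper_alt paper_content author_name affiliation
instance (paper_content : String) (author_name : String) (affiliation : String) (out : String) : Decidable (Spec_add_author_section_to_paper paper_content author_name affiliation out) := by unfold Spec_add_author_section_to_paper; infer_instance

-- ===== CLAIM (what is proved, stated in full; the proofs are below) =====
def Claim_equal_add_author_section_to_paper : Prop := ∀ (paper_content : String) (author_name : String) (affiliation : String), Dom_add_author_section_to_paper paper_content author_name affiliation → Spec_add_author_section_to_paper paper_content author_name affiliation (add_author_section_to_paper paper_content author_name affiliation)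

-- ===== LEMMAS AND PROOFS =====

-- The author-update part of A's loop, isolated (proof-side only).
def pvAuthPair : List String → Nat → Option Nat → Option Nat → Option Nat × Option Nat
  | [], _, st, en => (st, en)
  | l :: rest, i, st, en =>
    if pvIsAuthor l then pvAuthPair rest (i + 1) (if st.isNone then some i else st) (some (i + 1))
    else pvAuthPair rest (i + 1) st en

-- proof-side: the (absolute) indices of the author-like lines of seg, seg starting at index k
def pvRelAuthors (seg : List String) (k : Nat) : List Nat :=
  ((seg.zipIdx k).filter (fun p => pvIsAuthor p.1)).map (·.2)

-- mutual exclusion of the line predicates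
theorem pv_abstract_not_title (l : String) (h : pvIsAbstract l = true) : pvIsTitle l = false := by
  unfold pvIsAbstract at h
  have hq : "## Abstract".toList <+: (PySem.Str.strip l).toList := by
    simpa [PySem.Chars.startswith_iff] using h
  by_contra hne
  have ht : pvIsTitle l = true := by simpa using hne
  unfold pvIsTitle at ht
  have hp : "# ".toList <+: (PySem.Str.strip l).toList := by
    simpa [PySem.Chars.startswith_iff] using Bool.and_elim_left ht
  have : "# ".toList <+: "## Abstract".toList :=
    List.prefix_of_prefix_length_le hp hq (by decide)
  exact absurd this (by decide)

theorem pv_title_not_author (l : String) (h : pvIsTitle l = true) : pvIsAuthor l = false := by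
  unfold pvIsTitle at h
  have hq : "# ".toList <+: (PySem.Str.strip l).toList := by
    simpa [PySem.Chars.startswith_iff] using Bool.and_elim_left h
  by_contra hne
  have ht : pvIsAuthor l = true := by simpa using hne
  unfold pvIsAuthor at ht
  have hp : "*".toList <+: (PySem.Str.strip l).toList := by
    rcases Bool.or_eq_true_iff.mp ht with h1 | h2
    · have h2 : "**".toList <+: (PySem.Str.strip l).toList := by
        simpa [PySem.Chars.startswith_iff] using Bool.and_elim_left h1
      exact List.IsPrefix.trans (by decide) h2
    · simpa [PySem.Chars.startswith_iff] using Bool.and_elim_left (Bool.and_elim_left h2)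
  have : "*".toList <+: "# ".toList :=
    List.prefix_of_prefix_length_le hp hq (by decide)
  exact absurd this (by decide)

theorem pvRelAuthors_cons (l : String) (rest : List String) (k : Nat) :
    pvRelAuthors (l :: rest) k =
      if pvIsAuthor l then k :: pvRelAuthors rest (k + 1) else pvRelAuthors rest (k + 1) := by
  simp only [pvRelAuthors, List.zipIdx_cons, List.filter_cons]
  split <;> simp

theorem pvRelAuthors_append (xs ys : List String) (k : Nat) :
    pvRelAuthors (xs ++ ys) k = pvRelAuthors xs k ++ pvRelAuthors ys (k + xs.length) := by
  induction xs generalizing k with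
  | nil => simp [pvRelAuthors]
  | cons l rest ih =>
    rw [List.cons_append, pvRelAuthors_cons, pvRelAuthors_cons, ih]
    split <;> simp [Nat.add_assoc, Nat.add_comm 1]

theorem pvAuthPair_spec (seg : List String) (k : Nat) (st en : Option Nat) :
    pvAuthPair seg k st en =
      ((if st.isSome then st else (pvRelAuthors seg k).head?),
       (match (pvRelAuthors seg k).getLast? with | none => en | some j => some (j + 1))) := by
  induction seg generalizing k st en with
  | nil => cases st <;> simp [pvAuthPair, pvRelAuthors]
  | cons l rest ih =>
    rw [pvRelAuthors_cons]
    by_cases ha : pvIsAuthor l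
    · rw [show pvAuthPair (l :: rest) k st en
            = pvAuthPair rest (k + 1) (if st.isNone then some k else st) (some (k + 1)) from by
          simp [pvAuthPair, ha]]
      rw [ih]
      cases st <;> simp [ha, List.getLast?_cons] <;>
        cases hL : (pvRelAuthors rest (k + 1)).getLast? <;> simp [hL]
    · rw [show pvAuthPair (l :: rest) k st en = pvAuthPair rest (k + 1) st en from by
          simp [pvAuthPair, ha]]
      rw [ih]; simp [ha]

theorem pv_mem_relAuthors (seg : List String) (k j : Nat) (h : j ∈ pvRelAuthors seg k) :
    k ≤ j ∧ j < k + seg.length := by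
  simp only [pvRelAuthors, List.mem_map, List.mem_filter] at h
  obtain ⟨⟨a, j'⟩, ⟨hm, _⟩, rfl⟩ := h
  exact ⟨List.le_snd_of_mem_zipIdx hm, by have := List.snd_lt_add_of_mem_zipIdx hm; omega⟩

theorem pvScanA_phase2 (lines : List String) (i t0 : Nat) (st en : Option Nat) :
    pvScanA lines i (some t0) none st en =
      match lines.findIdx? pvIsAbstract with
      | none => (some t0, none, pvAuthPair lines i st en)
      | some k => (some t0, some (i + k), pvAuthPair (lines.take k) i st en) := by
  induction lines generalizing i st en with
  | nil => simp [pvScanA, pvAuthPair]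
  | cons l rest ih =>
    rw [List.findIdx?_cons]
    by_cases ha : pvIsAbstract l
    · simp [pvScanA, ha, pvAuthPair]
    · simp only [pvScanA, ha, if_false, Bool.false_eq_true, Option.isNone_some,
        Bool.false_and, Option.isSome_some, Bool.true_and, Option.isNone_none]
      rw [ih]
      cases hF : rest.findIdx? pvIsAbstract <;>
        by_cases hau : pvIsAuthor l <;>
          simp [pvAuthPair, ha, hau, Nat.add_assoc, Nat.add_comm 1]

theorem pvScanA_spec (lines : List String) (i : Nat) :
    pvScanA lines i none none none none =
      match lines.findIdx? pvIsAbstract with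
      | none =>
          match lines.findIdx? pvIsTitle with
          | none => (none, none, none, none)
          | some t => (some (i + t), none, pvAuthPair (lines.drop (t + 1)) (i + t + 1) none none)
      | some ab =>
          match (lines.take ab).findIdx? pvIsTitle with
          | none => (none, some (i + ab), none, none)
          | some t => (some (i + t), some (i + ab),
              pvAuthPair ((lines.take ab).drop (t + 1)) (i + t + 1) none none) := by
  induction lines generalizing i with
  | nil => simp [pvScanA]
  | cons l rest ih =>
    rw [List.findIdx?_cons]
    by_cases ha : pvIsAbstract l
    · have htl : pvIsTitle l = false := pv_abstract_not_title l ha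
      simp [pvScanA, ha, htl, List.findIdx?_cons]
    · by_cases htl : pvIsTitle l
      · have hau : pvIsAuthor l = false := pv_title_not_author l htl
        simp only [pvScanA, ha, htl, if_false, if_true, Bool.false_eq_true, Option.isNone_none,
          Bool.true_and, Option.isSome_some, hau, Bool.and_false, Bool.false_and, Bool.and_true]
        rw [pvScanA_phase2]
        cases hF : rest.findIdx? pvIsAbstract with
        | none => simp [List.findIdx?_cons, htl, Nat.add_assoc, Nat.add_comm 1]
        | some k =>
          simp [List.findIdx?_cons, htl, ha, List.take_succ_cons, Nat.add_assoc, Nat.add_comm 1]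
      · simp only [pvScanA, ha, htl, if_false, Bool.false_eq_true, Bool.and_false,
          Option.isNone_none, Bool.true_and, Option.isSome_none, Bool.false_and]
        rw [ih]
        cases hF : rest.findIdx? pvIsAbstract with
        | none =>
          cases hT : rest.findIdx? pvIsTitle <;>
            simp [List.findIdx?_cons, htl, hT, Nat.add_assoc, Nat.add_comm 1]
        | some k =>
          cases hT : (rest.take k).findIdx? pvIsTitle <;>
            simp [List.findIdx?_cons, htl, List.take_succ_cons, hT, Nat.add_assoc, Nat.add_comm 1]

-- the B-side predicates are definitionally the A-side ones
theorem pvIsTitleB_eq : pvIsTitleB = pvIsTitle := rfl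
theorem pvIsAbstractB_eq : pvIsAbstractB = pvIsAbstract := rfl
theorem pvIsAuthorB_eq : pvIsAuthorB = pvIsAuthor := rfl

-- characterisation of B's backward sweep
theorem pvFoldB_spec (lines : List String) (k : Nat) :
    (lines.zipIdx k).foldr (fun li st => pvStepB st li) (none, none, none) =
      match lines.findIdx? pvIsAbstract with
      | none => (none, none, none)
      | some ab =>
        (some (ab + k),
         ((lines.take ab).findIdx? pvIsTitle).map (· + k),
         (pvRelAuthors (lines.take ab) k).getLast?) := by
  induction lines generalizing k with
  | nil => simp
  | cons l rest ih =>
    rw [List.findIdx?_cons, List.zipIdx_cons, List.foldr_cons, ih]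
    by_cases ha : pvIsAbstract l
    · simp [pvStepB, pvIsTitleB_eq, pvIsAbstractB_eq, pvIsAuthorB_eq, ha, pvRelAuthors]
    · cases hF : rest.findIdx? pvIsAbstract with
      | none => simp [pvStepB, pvIsTitleB_eq, pvIsAbstractB_eq, pvIsAuthorB_eq, ha]
      | some ab =>
        by_cases htl : pvIsTitle l
        · have hau : pvIsAuthor l = false := pv_title_not_author l htl
          simp [pvStepB, pvIsTitleB_eq, pvIsAbstractB_eq, pvIsAuthorB_eq, ha, htl, List.take_succ_cons, List.findIdx?_cons,
            pvRelAuthors_cons, hau, Nat.add_assoc, Nat.add_comm 1]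
        · by_cases hau : pvIsAuthor l
          · cases hJ : (pvRelAuthors (rest.take ab) (k + 1)).getLast? with
            | none =>
              have hnil : pvRelAuthors (rest.take ab) (k + 1) = [] :=
                List.getLast?_eq_none_iff.mp hJ
              simp [pvStepB, pvIsTitleB_eq, pvIsAbstractB_eq, pvIsAuthorB_eq, ha, htl, hau, List.take_succ_cons, List.findIdx?_cons,
                pvRelAuthors_cons, hnil, Option.map_map, Nat.add_assoc, Nat.add_comm 1,
                Function.comp_def]
            | some j =>
              simp [pvStepB, pvIsTitleB_eq, pvIsAbstractB_eq, pvIsAuthorB_eq, ha, htl, hau, List.take_succ_cons, List.findIdx?_cons,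
                pvRelAuthors_cons, List.getLast?_cons, hJ, Option.map_map,
                Nat.add_assoc, Nat.add_comm 1, Function.comp_def]
          · simp [pvStepB, pvIsTitleB_eq, pvIsAbstractB_eq, pvIsAuthorB_eq, ha, htl, hau, List.take_succ_cons, List.findIdx?_cons,
              pvRelAuthors_cons, Option.map_map, Nat.add_assoc, Nat.add_comm 1,
              Function.comp_def]

theorem pv_final_glue (lines : List String) (blk : List String) (t ab j : Nat)
    (h1 : t + 1 ≤ j + 1) (h2 : j + 1 ≤ ab) :
    lines.take (t + 1) ++ (lines.drop (t + 1)).take ((j + 1) - (t + 1)) ++ blk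
        ++ (lines.drop (j + 1)).take (ab - (j + 1)) ++ lines.drop ab
      = lines.take (j + 1) ++ blk ++ lines.drop (j + 1) := by
  have e1 : lines.take (j + 1) = lines.take (t + 1) ++ (lines.drop (t + 1)).take ((j + 1) - (t + 1)) := by
    conv_lhs => rw [show j + 1 = (t + 1) + ((j + 1) - (t + 1)) from by omega]
    exact List.take_add ..
  have e2 : (lines.drop (j + 1)).take (ab - (j + 1)) ++ lines.drop ab = lines.drop (j + 1) := by
    have hd : (lines.drop (j + 1)).drop (ab - (j + 1)) = lines.drop ab := by
      rw [List.drop_drop]; congr 1; omega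
    rw [← hd, List.take_append_drop]
  conv_rhs => rw [e1, ← e2]
  simp [List.append_assoc]

-- ===== VERDICT (by name: the statement is the Claim_ definition above) =====
theorem add_author_section_to_paper_spec : Claim_equal_add_author_section_to_paper := by
  intro pc an aff _
  unfold Spec_add_author_section_to_paper add_author_section_to_paper add_author_section_to_paper_alt
  generalize (PySem.Str.split? pc "\n").getD [] = lines
  dsimp only
  rw [pvScanA_spec, pvFoldB_spec]
  cases hA : lines.findIdx? pvIsAbstract with
  | none =>
    dsimp only
    cases hT : lines.findIdx? pvIsTitle <;> simp only [hT] <;> cases lines <;> simp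
  | some ab =>
    dsimp only
    cases hT : (lines.take ab).findIdx? pvIsTitle with
    | none => cases lines <;> simp
    | some t =>
      dsimp only
      rw [pvAuthPair_spec, List.drop_take]
      simp only [Nat.zero_add, Nat.add_zero, Option.isSome_none, Bool.false_eq_true, if_false,
        Option.map_some]
      have htab : t < ab := by
        have hlt := (List.findIdx?_eq_some_iff_findIdx_eq.mp hT).1
        simp [List.length_take] at hlt
        omega
      have habLen : ab < lines.length := (List.findIdx?_eq_some_iff_findIdx_eq.mp hA).1
      -- split the author list at t+1
      have hSplit : lines.take ab = lines.take (t + 1) ++ (lines.drop (t + 1)).take (ab - (t + 1)) := by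
        conv_lhs => rw [show ab = (t + 1) + (ab - (t + 1)) from by omega]
        exact List.take_add ..
      have hLenT : (lines.take (t + 1)).length = t + 1 := by
        simp [List.length_take]; omega
      cases hL : (pvRelAuthors ((lines.drop (t + 1)).take (ab - (t + 1))) (t + 1)).getLast? with
      | none =>
        have hrel : pvRelAuthors ((lines.drop (t + 1)).take (ab - (t + 1))) (t + 1) = [] :=
          List.getLast?_eq_none_iff.mp hL
        rw [hSplit, pvRelAuthors_append, hLenT]
        simp only [Nat.zero_add, hrel, List.append_nil]
        cases hP : (pvRelAuthors (lines.take (t + 1)) 0).getLast? with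
        | none => simp
        | some p =>
          have hpmem : p ∈ pvRelAuthors (lines.take (t + 1)) 0 := List.mem_of_getLast? hP
          have hpb := pv_mem_relAuthors _ _ _ hpmem
          have : ¬ t < p := by
            have := hpb.2
            simp [List.length_take] at this
            omega
          simp [this]
      | some j =>
        have hmem : j ∈ pvRelAuthors ((lines.drop (t + 1)).take (ab - (t + 1))) (t + 1) :=
          List.mem_of_getLast? hL
        have hb := pv_mem_relAuthors _ _ _ hmem
        have hlen : ((lines.drop (t + 1)).take (ab - (t + 1))).length ≤ ab - (t + 1) := by
          simpa using List.length_take_le _ _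
        have hjab : j + 1 ≤ ab := by omega
        have hne : pvRelAuthors ((lines.drop (t + 1)).take (ab - (t + 1))) (t + 1) ≠ [] := by
          intro h; rw [h] at hL; simp at hL
        rw [hSplit, pvRelAuthors_append, hLenT]
        simp only [Nat.zero_add]
        rw [List.getLast?_append_of_ne_nil _ hne, hL]
        have htj : t < j := by omega
        cases hH : (pvRelAuthors ((lines.drop (t + 1)).take (ab - (t + 1))) (t + 1)).head? with
        | none =>
          rw [List.head?_eq_none_iff.mp hH] at hmem
          simp at hmem
        | some s =>
          dsimp only
          rw [pv_final_glue lines _ t ab j (by omega) hjab]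
          simp [htj]
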